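-- pv_equiv track=rewrite | github.com/akdl911215/algorithmTraining | python/algorithm/everything_algorithm/algorithm_study/level3/인사고과/인사고과3.py | solution
-- ===== SOURCE A (Python) =====
-- def solution(scores):
--     # 인센티브를 받지 못하는 사원 판별
--     can_receive = [True for _ in range(len(scores))]
--     for i in range(len(scores)):
--         for j in range(len(scores)):
--             if i != j and scores[i][0] < scores[j][0] and scores[i][1] < scores[j][1]:
--                 can_receive[i] = False
--                 break
--
--     # 인센티브를 받을 수 있는 사원들의 점수 합 계산
--     valid_scores = [(scores[i][0] + scores[i][1], i) for i in range(len(scores)) if can_receive[i]]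
--
--     # 점수 합으로 내림차순 정렬
--     valid_scores.sort(reverse=True, key=lambda x: x[0])
--
--     # 완호의 석차 찾기
--     rank = 1
--     for i in range(len(valid_scores)):
--         if i > 0 and valid_scores[i][0] < valid_scores[i - 1][0]:
--             rank = i + 1
--         if valid_scores[i][1] == 0:  # 완호의 인덱스
--             return rank
-- ===== SOURCE B (Python) =====
-- def solution(scores):
--     if not scores:
--         return None
--     a0, b0 = scores[0][0], scores[0][1]
--     s0 = a0 + b0
--     pairs = sorted(((row[0], row[1]) for row in scores), key=lambda p: p[0], reverse=True)
--     prev_a = None     # first score of the previous element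
--     max_strict = None # max second score among employees with strictly greater first score
--     max_cur = None    # max second score among all employees seen so far
--     count = 0         # non-dominated employees with score sum strictly above s0
--     nd0 = False       # is employee 0's score pair non-dominated?
--     for a, b in pairs:
--         if prev_a is not None and a != prev_a:
--             max_strict = max_cur
--         prev_a = a
--         nd = max_strict is None or max_strict <= b
--         if nd and a + b > s0:
--             count += 1
--         if nd and a == a0 and b == b0:
--             nd0 = True
--         max_cur = b if max_cur is None else max(max_cur, b)
--     return 1 + count if nd0 else None
-- ===== Notes on version B (the rewrite author's own statement) =====
-- stated objective: alternative
-- what changed: B replaces A's all-pairs dominance test and sort-by-sum-then-rank-scan by a single sort by first score descending with one sweep that tracks the max second score among strictly greater firsts (Pareto frontier) and counts non-dominated employees whose score sum exceeds employee 0's, returning 1 + that count; worst-case O(n log n) vs A's O(n^2), though A's early breaks make it comparable on random inputs.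
import Mathlib
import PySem

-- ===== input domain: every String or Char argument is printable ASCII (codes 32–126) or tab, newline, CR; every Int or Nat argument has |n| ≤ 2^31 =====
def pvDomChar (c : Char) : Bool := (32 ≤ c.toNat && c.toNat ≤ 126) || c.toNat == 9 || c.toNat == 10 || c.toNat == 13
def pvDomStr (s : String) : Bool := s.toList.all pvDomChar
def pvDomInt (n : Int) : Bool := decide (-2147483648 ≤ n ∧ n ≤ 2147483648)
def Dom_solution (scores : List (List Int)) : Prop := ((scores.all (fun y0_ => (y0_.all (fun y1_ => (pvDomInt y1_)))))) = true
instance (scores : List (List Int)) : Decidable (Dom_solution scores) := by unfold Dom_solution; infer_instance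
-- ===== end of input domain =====

-- B re-implements A by a different algorithm: one descending sort by first score plus a single
-- Pareto-frontier sweep replaces A's all-pairs dominance test and sort-by-sum rank scan.

-- row accessors scores[i][0] / scores[i][1]; exact under Pre_ (every row has length ≥ 2)
def fstOf (r : List Int) : Int := r.getD 0 0
def sndOf (r : List Int) : Int := r.getD 1 0

-- ===== PORT A =====
-- inner j-loop with break: can_receive[i] becomes false iff some j dominates i
def canRecv (scores : List (List Int)) (i : Nat) : Bool :=
  !((List.range scores.length).any (fun j =>
      decide (j ≠ i) && decide (fstOf (scores.getD i []) < fstOf (scores.getD j []))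
        && decide (sndOf (scores.getD i []) < sndOf (scores.getD j []))))

def validA (scores : List (List Int)) : List (Int × Nat) :=
  ((List.range scores.length).filter (fun i => canRecv scores i)).map
    (fun i => (fstOf (scores.getD i []) + sndOf (scores.getD i []), i))

-- the final rank-scan loop of A (prev = previous sum, pos = loop index i)
def goA : Int → Int → Nat → List (Int × Nat) → Option Int
  | _, _, _, [] => none
  | prev, rank, pos, (s, idx) :: rest =>
    let rank' := if 0 < pos ∧ s < prev then (pos : Int) + 1 else rank
    if idx = 0 then some rank' else goA s rank' (pos + 1) rest

def solution (scores : List (List Int)) : Option Int :=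
  goA 0 1 0 (PySem.List.sorted (validA scores) (fun x => x.1) true)

-- ===== PORT B =====
-- sweep state: (prev_a, max_strict, max_cur, count, nd0)
def stepB (a0 b0 s0 : Int) (st : Option Int × Option Int × Option Int × Int × Bool)
    (p : Int × Int) : Option Int × Option Int × Option Int × Int × Bool :=
  let prevA := st.1
  let maxStrict := st.2.1
  let maxCur := st.2.2.1
  let count := st.2.2.2.1
  let nd0 := st.2.2.2.2
  let maxStrict' := match prevA with
    | some pa => if p.1 ≠ pa then maxCur else maxStrict
    | none => maxStrict
  let nd : Bool := match maxStrict' with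
    | none => true
    | some m => decide (m ≤ p.2)
  let count' := if nd && decide (s0 < p.1 + p.2) then count + 1 else count
  let nd0' := nd0 || (nd && decide (p.1 = a0) && decide (p.2 = b0))
  let maxCur' := match maxCur with
    | none => some p.2
    | some m => some (max m p.2)
  (some p.1, maxStrict', maxCur', count', nd0')

def solution_alt (scores : List (List Int)) : Option Int :=
  match scores with
  | [] => none
  | r0 :: _ =>
    let a0 := fstOf r0
    let b0 := sndOf r0
    let s0 := a0 + b0
    let pairs := PySem.List.sorted (scores.map (fun r => (fstOf r, sndOf r))) (fun p => p.1) true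
    let st := pairs.foldl (stepB a0 b0 s0) (none, none, none, 0, false)
    if st.2.2.2.2 then some (1 + st.2.2.2.1) else none

-- ===== PRECONDITION & SPEC =====
-- Pre_ excludes exactly the inputs containing a row of fewer than two scores, on which the
-- Python A raises IndexError when it reads scores[i][0] / scores[i][1].
def Pre_solution (scores : List (List Int)) : Prop := ∀ r ∈ scores, 2 ≤ r.length
instance (scores : List (List Int)) : Decidable (Pre_solution scores) := by
  unfold Pre_solution; infer_instance
def pvWitness_solution : List (List Int) := [[1, 2], [3, 4]]

def Spec_solution (scores : List (List Int)) (out : Option Int) : Prop := out = solution_alt scores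
instance (scores : List (List Int)) (out : Option Int) : Decidable (Spec_solution scores out) := by
  unfold Spec_solution; infer_instance

-- ===== CLAIM (what is proved, stated in full; the proofs are below) =====
def Claim_equal_solution : Prop := ∀ (scores : List (List Int)), Dom_solution scores → Pre_solution scores → Spec_solution scores (solution scores)

-- ===== LEMMAS AND PROOFS =====

def pairsOf (scores : List (List Int)) : List (Int × Int) :=
  scores.map (fun r => (fstOf r, sndOf r))

-- p is Pareto-non-dominated within P
def ndB (P : List (Int × Int)) (p : Int × Int) : Bool :=
  P.all (fun q => !(decide (p.1 < q.1) && decide (p.2 < q.2)))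

-- max of second components
def maxB : List (Int × Int) → Option Int
  | [] => none
  | p :: t => some (t.foldl (fun m q => max m q.2) p.2)

-- common characterization of both programs
def answer (scores : List (List Int)) : Option Int :=
  match scores with
  | [] => none
  | r0 :: _ =>
    let P := pairsOf scores
    let s0 := fstOf r0 + sndOf r0
    if ndB P (fstOf r0, sndOf r0) then
      some (1 + (P.countP (fun q => ndB P q && decide (s0 < q.1 + q.2)) : Int))
    else none

lemma goA_eq (rest : List (Int × Nat)) : ∀ (prev : Int) (c pos : Nat), c ≤ pos →
    rest.Pairwise (fun p q => q.1 ≤ p.1) →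
    (∀ q ∈ rest, q.1 ≤ prev) →
    goA prev (1 + (c : Int)) pos rest =
      (rest.find? (fun q => q.2 == 0)).map
        (fun f => 1 + (if f.1 = prev then (c : Int) else (pos : Int))
            + (rest.countP (fun q => decide (f.1 < q.1)) : Int)) := by
  induction rest with
  | nil => intro prev c pos _ _ _; simp [goA]
  | cons p tl ih =>
    intro prev c pos hc hpair hb
    obtain ⟨s, idx⟩ := p
    have hsprev : s ≤ prev := hb (s, idx) (by simp)
    have htl_le : ∀ q ∈ tl, q.1 ≤ s := by
      intro q hq; exact (List.pairwise_cons.mp hpair).1 q hq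
    have hrank' : (if 0 < pos ∧ s < prev then (pos : Int) + 1 else 1 + (c : Int))
        = 1 + (((if s = prev then c else pos) : Nat) : Int) := by
      rcases eq_or_lt_of_le hsprev with h | h
      · simp [h]
      · have hne : s ≠ prev := ne_of_lt h
        rcases Nat.eq_zero_or_pos pos with hp | hp
        · have : c = 0 := by omega
          simp [hp, hne, this]
        · simp [hp, h, hne]
          ring
    by_cases hidx : idx = 0
    · subst hidx
      have hcnt : (tl.countP (fun q => decide (s < q.1))) = 0 := by
        rw [List.countP_eq_zero]
        intro q hq
        simpa using not_lt.mpr (htl_le q hq)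
      simp [goA, List.find?, hcnt, List.countP_cons, hrank']
    · have hstep : goA prev (1 + (c : Int)) pos ((s, idx) :: tl)
          = goA s (1 + (((if s = prev then c else pos) : Nat) : Int)) (pos + 1) tl := by
        rw [show goA prev (1 + (c : Int)) pos ((s, idx) :: tl)
            = goA s (if 0 < pos ∧ s < prev then (pos : Int) + 1 else 1 + (c : Int)) (pos + 1) tl
          from by simp [goA, hidx], hrank']
      rw [hstep, ih s (if s = prev then c else pos) (pos + 1)
        (by split <;> omega) (List.pairwise_cons.mp hpair).2 htl_le]
      have hfind : List.find? (fun q => q.2 == 0) ((s, idx) :: tl)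
          = List.find? (fun q => q.2 == 0) tl := by
        have : (idx == 0) = false := by simpa using hidx
        simp [List.find?, this]
      rw [hfind]
      rcases h : List.find? (fun q => q.2 == 0) tl with _ | f
      · rw [h]; rfl
      · rw [h]
        have hf_mem := List.mem_of_find?_eq_some h
        have hfs : f.1 ≤ s := htl_le f hf_mem
        simp only [Option.map_some]
        congr 1
        rw [List.countP_cons]
        rcases eq_or_lt_of_le hfs with he | hlt
        · rw [he]
          push_cast
          simp
        · have : f.1 ≠ prev := by omega
          simp [hlt, ne_of_lt hlt, this]
          ring

lemma find0_eq (l : List (Int × Nat)) (v : Int × Nat) (hv : v.2 = 0)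
    (h : ∀ q ∈ l, q.2 = 0 → q = v) :
    l.find? (fun q => q.2 == 0) = if v ∈ l then some v else none := by
  induction l with
  | nil => simp
  | cons p tl ih =>
    by_cases hp : p.2 = 0
    · have hpv : p = v := h p (by simp) hp
      simp [List.find?, hpv, hv]
    · have hpb : (p.2 == 0) = false := by simpa using hp
      have hpv : p ≠ v := fun he => hp (he ▸ hv)
      rw [List.find?, hpb, ih (fun q hq => h q (List.mem_cons_of_mem _ hq))]
      simp [List.mem_cons, hpv.symm]

lemma countP_range_getD {α : Type} (l : List α) (d : α) (F : α → Bool) :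
    (List.range l.length).countP (fun i => F (l.getD i d)) = l.countP F := by
  induction l with
  | nil => simp
  | cons x t ih =>
    simp only [List.getD_eq_getElem?_getD] at ih ⊢
    rw [List.length_cons, List.range_succ_eq_map, List.countP_cons, List.countP_map]
    simp only [Function.comp_def, List.getElem?_cons_zero, List.getElem?_cons_succ,
      Option.getD_some]
    rw [ih, List.countP_cons]
    by_cases hF : F x <;> simp [hF]

lemma any_range_getD {α : Type} (l : List α) (d : α) (F : α → Bool) :
    (List.range l.length).any (fun i => F (l.getD i d)) = l.any F := by
  induction l with
  | nil => simp
  | cons x t ih =>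
    simp only [List.getD_eq_getElem?_getD] at ih ⊢
    rw [List.length_cons, List.range_succ_eq_map]
    simp only [List.any_cons, List.any_map, Function.comp_def, List.getElem?_cons_zero,
      List.getElem?_cons_succ, Option.getD_some]
    rw [ih]

lemma canRecv_eq (scores : List (List Int)) (i : Nat) (hi : i < scores.length) :
    canRecv scores i
      = ndB (pairsOf scores) (fstOf (scores.getD i []), sndOf (scores.getD i [])) := by
  have hx : canRecv scores i
      = !((List.range scores.length).any (fun j =>
          decide (fstOf (scores.getD i []) < fstOf (scores.getD j []))
            && decide (sndOf (scores.getD i []) < sndOf (scores.getD j [])))) := by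
    unfold canRecv
    congr 1
    rw [Bool.eq_iff_iff]
    simp only [List.any_eq_true, List.mem_range, Bool.and_eq_true, decide_eq_true_eq, ne_eq]
    constructor
    · rintro ⟨j, hj, ⟨_, h1⟩, h2⟩
      exact ⟨j, hj, h1, h2⟩
    · rintro ⟨j, hj, h1, h2⟩
      by_cases hji : j = i
      · subst hji; exact absurd h1 (lt_irrefl _)
      · exact ⟨j, hj, ⟨hji, h1⟩, h2⟩
  rw [hx]
  unfold ndB
  rw [List.all_eq_not_any_not]
  simp only [Bool.not_not]
  congr 1
  rw [pairsOf, List.any_map]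
  exact any_range_getD scores ([] : List Int)
    (fun r => decide (fstOf (scores.getD i []) < fstOf r)
      && decide (sndOf (scores.getD i []) < sndOf r))

lemma mem_validA (scores : List (List Int)) (q : Int × Nat) :
    q ∈ validA scores ↔ ∃ i, i < scores.length ∧ canRecv scores i = true ∧
      q = (fstOf (scores.getD i []) + sndOf (scores.getD i []), i) := by
  unfold validA
  simp only [List.mem_map, List.mem_filter, List.mem_range]
  constructor
  · rintro ⟨i, ⟨hi, hcr⟩, rfl⟩; exact ⟨i, hi, hcr, rfl⟩
  · rintro ⟨i, hi, hcr, rfl⟩; exact ⟨i, ⟨hi, hcr⟩, rfl⟩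

lemma A_char (scores : List (List Int)) : solution scores = answer scores := by
  cases scores with
  | nil => decide
  | cons r0 rest =>
    have hn : 0 < (r0 :: rest).length := by simp
    have hgd0 : (r0 :: rest).getD 0 [] = r0 := rfl
    set sc := r0 :: rest with hsc
    set P := pairsOf sc with hP
    set s0 : Int := fstOf r0 + sndOf r0 with hs0
    set v : Int × Nat := (s0, 0) with hv
    set S := PySem.List.sorted (validA sc) (fun x => x.1) true with hS
    have hperm : S.Perm (validA sc) := PySem.List.sorted_perm _ _ _
    have hpair : S.Pairwise (fun p q => q.1 ≤ p.1) := PySem.List.sorted_pairwise_rev _ _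
    have hnd0 : canRecv sc 0 = ndB P (fstOf r0, sndOf r0) := by
      rw [canRecv_eq sc 0 hn, hgd0]
    have hkey : ∀ q ∈ S, q.2 = 0 → q = v := by
      intro q hq hq2
      obtain ⟨i, hi, hcr, he⟩ := (mem_validA sc q).mp (hperm.mem_iff.mp hq)
      have hi0 : i = 0 := by rw [he] at hq2; exact hq2
      subst hi0
      rw [he, hgd0]
    have hvmem : v ∈ S ↔ ndB P (fstOf r0, sndOf r0) = true := by
      rw [hperm.mem_iff, mem_validA]
      constructor
      · rintro ⟨i, hi, hcr, he⟩
        have hi0 : i = 0 := by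
          have := congrArg Prod.snd he; simpa using this.symm
        subst hi0
        rw [← hnd0]; exact hcr
      · intro hnd
        exact ⟨0, hn, by rw [hnd0]; exact hnd, by rw [hgd0]⟩
    have hcount : S.countP (fun q => decide (s0 < q.1))
        = P.countP (fun q => ndB P q && decide (s0 < q.1 + q.2)) := by
      rw [hperm.countP_eq]
      unfold validA
      rw [List.countP_map, List.countP_filter]
      rw [List.countP_congr (q := fun i =>
        (fun r => ndB P (fstOf r, sndOf r) && decide (s0 < fstOf r + sndOf r))
          (sc.getD i [])) ?_]
      · beta_reduce
        refine (countP_range_getD sc ([] : List Int) (fun r =>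
          ndB P (fstOf r, sndOf r) && decide (s0 < fstOf r + sndOf r))).trans ?_
        rw [hP, pairsOf, List.countP_map]
        rfl
      · intro i hi
        simp only [List.mem_range] at hi
        simp only [Function.comp]
        rw [canRecv_eq sc i hi, Bool.and_comm]
    show goA 0 1 0 S = answer sc
    have hans : answer sc = (if ndB P (fstOf r0, sndOf r0) then
        some (1 + (P.countP (fun q => ndB P q && decide (s0 < q.1 + q.2)) : Int)) else none) := by
      rfl
    rw [hans]
    rcases hSc : S with _ | ⟨x, tl⟩
    · have hnm : v ∉ S := by rw [hSc]; simp
      have hnd : ndB P (fstOf r0, sndOf r0) = false := by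
        rcases Bool.eq_false_or_eq_true (ndB P (fstOf r0, sndOf r0)) with h | h
        · exact absurd (hvmem.mpr h) hnm
        · exact h
      rw [hnd]
      simp [goA]
    · rw [hSc] at hpair hkey
      have hb : ∀ q ∈ x :: tl, q.1 ≤ x.1 := by
        intro q hq
        rcases List.mem_cons.mp hq with rfl | hq'
        · exact le_rfl
        · exact (List.pairwise_cons.mp hpair).1 q hq'
      have h0 : goA 0 1 0 (x :: tl) = goA x.1 (1 + ((0 : Nat) : Int)) 0 (x :: tl) := by
        by_cases h : x.2 = 0 <;> simp [goA, h]
      rw [h0, goA_eq (x :: tl) x.1 0 0 le_rfl hpair hb,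
        find0_eq (x :: tl) v rfl hkey]
      by_cases hm : v ∈ x :: tl
      · have hnd : ndB P (fstOf r0, sndOf r0) = true := hvmem.mp (hSc ▸ hm)
        rw [if_pos hm, hnd, if_pos rfl]
        simp only [Option.map_some]
        rw [← hSc, hcount]
        simp
      · have hnd : ndB P (fstOf r0, sndOf r0) = false := by
          rcases Bool.eq_false_or_eq_true (ndB P (fstOf r0, sndOf r0)) with h | h
          · exact absurd (hSc ▸ hvmem.mpr h) hm
          · exact h
        rw [if_neg hm, hnd]
        rfl

lemma foldl_max_le_iff (t : List (Int × Int)) : ∀ (b x : Int),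
    t.foldl (fun m q => max m q.2) b ≤ x ↔ b ≤ x ∧ ∀ q ∈ t, q.2 ≤ x := by
  induction t with
  | nil => intro b x; simp
  | cons p tl ih =>
    intro b x
    rw [List.foldl_cons, ih]
    simp only [max_le_iff, List.mem_cons]
    constructor
    · rintro ⟨⟨hb, hp⟩, ht⟩
      exact ⟨hb, fun q hq => by rcases hq with rfl | hq; exact hp; exact ht q hq⟩
    · rintro ⟨hb, h⟩
      exact ⟨⟨hb, h p (Or.inl rfl)⟩, fun q hq => h q (Or.inr hq)⟩

lemma maxB_le_iff (l : List (Int × Int)) (m x : Int) (h : maxB l = some m) :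
    m ≤ x ↔ ∀ q ∈ l, q.2 ≤ x := by
  cases l with
  | nil => simp [maxB] at h
  | cons p t =>
    simp only [maxB, Option.some.injEq] at h
    subst h
    rw [foldl_max_le_iff]
    simp [List.mem_cons]

lemma maxB_ge (l : List (Int × Int)) (m : Int) (h : maxB l = some m) :
    ∀ q ∈ l, q.2 ≤ m := (maxB_le_iff l m m h).mp le_rfl

lemma maxB_eq_none_iff (l : List (Int × Int)) : maxB l = none ↔ l = [] := by
  cases l <;> simp [maxB]

lemma maxB_concat (l : List (Int × Int)) (p : Int × Int) :
    maxB (l ++ [p]) = some (match maxB l with | none => p.2 | some m => max m p.2) := by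
  cases l with
  | nil => rfl
  | cons x t => simp [maxB, List.foldl_append]

lemma nd_iff (S : List (Int × Int)) (p : Int × Int) :
    ndB S p = (match maxB (S.filter (fun q => decide (p.1 < q.1))) with
      | none => true
      | some m => decide (m ≤ p.2)) := by
  rcases h : maxB (S.filter (fun q => decide (p.1 < q.1))) with _ | m
  · have hf := (maxB_eq_none_iff _).mp h
    rw [List.filter_eq_nil_iff] at hf
    simp only [ndB]
    rw [List.all_eq_true]
    intro q hq
    have := hf q hq
    simp only [decide_eq_true_eq] at this
    simp [this]
  · rw [Bool.eq_iff_iff]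
    simp only [ndB, List.all_eq_true, Bool.not_eq_eq_eq_not, Bool.not_true,
      Bool.and_eq_false_iff, decide_eq_false_iff_not, decide_eq_true_eq]
    constructor
    · intro hall
      rw [maxB_le_iff _ _ _ h]
      intro q hq
      rw [List.mem_filter] at hq
      rcases hall q hq.1 with h1 | h1
      · exact absurd (by simpa using hq.2) h1
      · omega
    · intro hm q hq
      by_cases hlt : p.1 < q.1
      · have hqf : q ∈ S.filter (fun q => decide (p.1 < q.1)) :=
          List.mem_filter.mpr ⟨hq, by simpa using hlt⟩
        have := maxB_ge _ _ h q hqf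
        right; omega
      · left; exact hlt

lemma getLast_le (l : List (Int × Int)) (hp : l.Pairwise (fun p q => q.1 ≤ p.1))
    (x : Int × Int) (h : l.getLast? = some x) : ∀ q ∈ l, x.1 ≤ q.1 := by
  induction l with
  | nil => simp at h
  | cons y t ih =>
    cases t with
    | nil =>
      simp only [List.getLast?_singleton, Option.some.injEq] at h
      subst h
      simp
    | cons z t' =>
      rw [List.getLast?_cons_cons] at h
      have hx : x ∈ z :: t' := List.mem_of_getLast? h
      intro q hq
      rcases List.mem_cons.mp hq with rfl | hq'
      · exact (List.pairwise_cons.mp hp).1 x hx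
      · exact ih (List.pairwise_cons.mp hp).2 h q hq'

lemma ndB_perm (l l' : List (Int × Int)) (h : l.Perm l') (p : Int × Int) :
    ndB l p = ndB l' p := by
  rw [Bool.eq_iff_iff]
  simp only [ndB, List.all_eq_true]
  exact ⟨fun ha q hq => ha q (h.mem_iff.mpr hq), fun ha q hq => ha q (h.mem_iff.mp hq)⟩

lemma any_nd0 (l : List (Int × Int)) (v : Int × Int) (hv : v ∈ l) :
    l.any (fun q => ndB l q && decide (q.1 = v.1) && decide (q.2 = v.2)) = ndB l v := by
  rw [Bool.eq_iff_iff]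
  simp only [List.any_eq_true, Bool.and_eq_true, decide_eq_true_eq]
  constructor
  · rintro ⟨q, hq, ⟨hnd, h1⟩, h2⟩
    have : q = v := Prod.ext h1 h2
    exact this ▸ hnd
  · intro hnd
    exact ⟨v, hv, ⟨hnd, rfl⟩, rfl⟩

lemma foldB_eq (a0 b0 s0 : Int) (S : List (Int × Int))
    (hpair : S.Pairwise (fun p q => q.1 ≤ p.1)) :
    ∀ (rest done : List (Int × Int)), S = done ++ rest →
    ∀ (maxStrict : Option Int) (count : Int) (nd0 : Bool),
    (∀ pa, (done.getLast?).map Prod.fst = some pa →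
        maxStrict = maxB (S.filter (fun q => decide (pa < q.1)))) →
    ((done.getLast?).map Prod.fst = none → maxStrict = none) →
    (rest.foldl (stepB a0 b0 s0)
        ((done.getLast?).map Prod.fst, maxStrict, maxB done, count, nd0)).2.2.2
      = (count + (rest.countP (fun q => ndB S q && decide (s0 < q.1 + q.2)) : Int),
         nd0 || rest.any (fun q => ndB S q && decide (q.1 = a0) && decide (q.2 = b0))) := by
  intro rest
  induction rest with
  | nil =>
    intro done hS maxStrict count nd0 h1 h0
    simp
  | cons p tl ih =>
    intro done hS maxStrict count nd0 h1 h0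
    -- the stored maxStrict' equals the max second score among strictly greater firsts
    have hstar : (match (done.getLast?).map Prod.fst with
          | some pa => if p.1 ≠ pa then maxB done else maxStrict
          | none => maxStrict)
        = maxB (S.filter (fun q => decide (p.1 < q.1))) := by
      rcases hdl : done.getLast? with _ | last
      · have hdone : done = [] := List.getLast?_eq_none_iff.mp hdl
        subst hdone
        simp only [hS, List.nil_append] at hpair ⊢
        rw [Option.map_none]
        have hf : (p :: tl).filter (fun q => decide (p.1 < q.1)) = [] := by
          rw [List.filter_eq_nil_iff]
          intro q hq
          rcases List.mem_cons.mp hq with rfl | hq'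
          · simp
          · have := (List.pairwise_cons.mp hpair).1 q hq'
            simp; omega
        rw [hf]
        simp [maxB, h0 rfl]
      · simp only [Option.map_some]
        have hdone_pair : done.Pairwise (fun p q => q.1 ≤ p.1) :=
          (List.pairwise_append.mp (hS ▸ hpair)).1
        have hcross := (List.pairwise_append.mp (hS ▸ hpair)).2.2
        have hlast_mem : last ∈ done := List.mem_of_getLast? hdl
        have hple : p.1 ≤ last.1 := hcross last hlast_mem p (by simp)
        by_cases hne : p.1 = last.1
        · rw [if_neg (by simpa using hne), h1 last.1 (by rw [hdl]; rfl), hne]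
        · rw [if_pos (by simpa using hne)]
          have hlt : p.1 < last.1 := lt_of_le_of_ne hple hne
          have hfd : done.filter (fun q => decide (p.1 < q.1)) = done := by
            rw [List.filter_eq_self]
            intro q hq
            have := getLast_le done hdone_pair last hdl q hq
            simp; omega
          have hfr : (p :: tl).filter (fun q => decide (p.1 < q.1)) = [] := by
            rw [List.filter_eq_nil_iff]
            intro q hq
            rcases List.mem_cons.mp hq with rfl | hq'
            · simp
            · have hrt : (p :: tl).Pairwise (fun p q => q.1 ≤ p.1) :=
                (List.pairwise_append.mp (hS ▸ hpair)).2.1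
              have := (List.pairwise_cons.mp hrt).1 q hq'
              simp; omega
          rw [hS, List.filter_append, hfd, hfr, List.append_nil]
    have hnd : (match maxB (S.filter (fun q => decide (p.1 < q.1))) with
          | none => true
          | some m => decide (m ≤ p.2)) = ndB S p := (nd_iff S p).symm
    rw [List.foldl_cons]
    have hstep : stepB a0 b0 s0 ((done.getLast?).map Prod.fst, maxStrict, maxB done, count, nd0) p
        = (((done ++ [p]).getLast?).map Prod.fst,
           maxB (S.filter (fun q => decide (p.1 < q.1))),
           maxB (done ++ [p]),
           (if ndB S p && decide (s0 < p.1 + p.2) then count + 1 else count),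
           (nd0 || (ndB S p && decide (p.1 = a0) && decide (p.2 = b0)))) := by
      unfold stepB
      rw [List.getLast?_concat, maxB_concat]
      simp only [hstar, hnd, Option.map_some]
      cases maxB done <;> rfl
    rw [hstep, ih (done ++ [p]) (by simp [hS])
      (maxB (S.filter (fun q => decide (p.1 < q.1))))
      (if ndB S p && decide (s0 < p.1 + p.2) then count + 1 else count)
      (nd0 || (ndB S p && decide (p.1 = a0) && decide (p.2 = b0)))
      (by
        intro pa hpa
        rw [List.getLast?_concat, Option.map_some, Option.some.injEq] at hpa
        rw [← hpa])
      (by rw [List.getLast?_concat]; simp)]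
    rw [List.countP_cons, List.any_cons]
    congr 1
    · by_cases hc : (ndB S p && decide (s0 < p.1 + p.2) : Bool) <;> simp [hc] <;> ring
    · rw [Bool.or_assoc]

lemma B_char (scores : List (List Int)) : solution_alt scores = answer scores := by
  cases scores with
  | nil => rfl
  | cons r0 rest =>
    have hmem0 : (fstOf r0, sndOf r0) ∈ pairsOf (r0 :: rest) := by
      unfold pairsOf
      exact List.mem_map.mpr ⟨r0, by simp, rfl⟩
    show (let a0 := fstOf r0
          let b0 := sndOf r0
          let s0 := a0 + b0
          let pairs := PySem.List.sorted ((r0 :: rest).map (fun r => (fstOf r, sndOf r)))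
            (fun p => p.1) true
          let st := pairs.foldl (stepB a0 b0 s0) (none, none, none, 0, false)
          if st.2.2.2.2 then some (1 + st.2.2.2.1) else none) = answer (r0 :: rest)
    simp only []
    set P := pairsOf (r0 :: rest) with hP
    set pairs := PySem.List.sorted ((r0 :: rest).map (fun r => (fstOf r, sndOf r)))
      (fun p => p.1) true with hpairs
    have hperm : pairs.Perm P := PySem.List.sorted_perm _ _ _
    have hpairw : pairs.Pairwise (fun p q => q.1 ≤ p.1) := PySem.List.sorted_pairwise_rev _ _
    have hfold := foldB_eq (fstOf r0) (sndOf r0) (fstOf r0 + sndOf r0) pairs hpairw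
      pairs [] rfl none 0 false (by intro pa hpa; simp at hpa) (fun _ => rfl)
    have hst : (pairs.foldl (stepB (fstOf r0) (sndOf r0) (fstOf r0 + sndOf r0))
        (none, none, none, 0, false)).2.2.2
        = ((0 : Int) + (pairs.countP (fun q => ndB pairs q
              && decide (fstOf r0 + sndOf r0 < q.1 + q.2)) : Int),
           false || pairs.any (fun q => ndB pairs q && decide (q.1 = fstOf r0)
              && decide (q.2 = sndOf r0))) := hfold
    have hmem0' : (fstOf r0, sndOf r0) ∈ pairs := hperm.mem_iff.mpr hmem0
    have hany : pairs.any (fun q => ndB pairs q && decide (q.1 = fstOf r0)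
        && decide (q.2 = sndOf r0)) = ndB P (fstOf r0, sndOf r0) := by
      rw [any_nd0 pairs (fstOf r0, sndOf r0) hmem0', ndB_perm pairs P hperm]
    have hcnt : pairs.countP (fun q => ndB pairs q
          && decide (fstOf r0 + sndOf r0 < q.1 + q.2))
        = P.countP (fun q => ndB P q && decide (fstOf r0 + sndOf r0 < q.1 + q.2)) := by
      rw [List.countP_congr (fun q _ => by rw [ndB_perm pairs P hperm]), hperm.countP_eq]
    have hfst : (pairs.foldl (stepB (fstOf r0) (sndOf r0) (fstOf r0 + sndOf r0))
        (none, none, none, 0, false)).2.2.2.2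
        = ndB P (fstOf r0, sndOf r0) := by
      rw [show (pairs.foldl (stepB (fstOf r0) (sndOf r0) (fstOf r0 + sndOf r0))
          (none, none, none, 0, false)).2.2.2.2
        = ((pairs.foldl (stepB (fstOf r0) (sndOf r0) (fstOf r0 + sndOf r0))
          (none, none, none, 0, false)).2.2.2).2 from rfl, hst, ← hany]
      rfl
    have hsnd : (pairs.foldl (stepB (fstOf r0) (sndOf r0) (fstOf r0 + sndOf r0))
        (none, none, none, 0, false)).2.2.2.1
        = (P.countP (fun q => ndB P q && decide (fstOf r0 + sndOf r0 < q.1 + q.2)) : Int) := by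
      rw [show (pairs.foldl (stepB (fstOf r0) (sndOf r0) (fstOf r0 + sndOf r0))
          (none, none, none, 0, false)).2.2.2.1
        = ((pairs.foldl (stepB (fstOf r0) (sndOf r0) (fstOf r0 + sndOf r0))
          (none, none, none, 0, false)).2.2.2).1 from rfl, hst, ← hcnt]
      ring
    rw [hfst, hsnd]
    rfl

-- ===== VERDICT (by name: the statement is the Claim_ definition above) =====
theorem solution_spec : Claim_equal_solution := by
  intro scores _ _
  unfold Spec_solution
  rw [A_char, B_char]
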